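-- pv_equiv track=rewrite | github.com/benquick123/code-profiling | code/izpiti/izpit01a/M-17023-1277.py | roboti
-- ===== SOURCE A (Python) =====
-- def roboti(navodila, n):
--     trenutni_robot = 0
--     seznam_robotov = []
--     for i in range(n):
--         seznam_robotov.append((0,0))
--
--     for znak in navodila:
--         if znak == "J":
--             seznam_robotov[trenutni_robot] = (seznam_robotov[trenutni_robot][0],seznam_robotov[trenutni_robot][1]-1)
--         if znak == "S":
--             seznam_robotov[trenutni_robot] = (seznam_robotov[trenutni_robot][0], seznam_robotov[trenutni_robot][1] + 1)
--         if znak == "Z":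
--             seznam_robotov[trenutni_robot] = (seznam_robotov[trenutni_robot][0] - 1, seznam_robotov[trenutni_robot][1])
--         if znak == "V":
--             seznam_robotov[trenutni_robot] = (seznam_robotov[trenutni_robot][0] + 1, seznam_robotov[trenutni_robot][1])
--
--         trenutni_robot = (trenutni_robot+1)%n
--
--     return seznam_robotov
-- ===== SOURCE B (Python) =====
-- def roboti(navodila, n):
--     delta = {"J": (0, -1), "S": (0, 1), "Z": (-1, 0), "V": (1, 0)}
--     rezultat = []
--     for i in range(n):
--         x, y = 0, 0
--         for j in range(i, len(navodila), n):
--             dx, dy = delta.get(navodila[j], (0, 0))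
--             x += dx
--             y += dy
--         rezultat.append((x, y))
--     return rezultat
-- ===== Notes on version B (the rewrite author's own statement) =====
-- stated objective: alternative
-- what changed: Instead of one interleaved pass that cycles a round-robin index and updates a mutable tuple list, B processes each robot separately, summing (dx,dy) from a delta table over that robot's own instruction positions i, i+n, i+2n, ...
-- crash fix: On non-empty navodila A raises (IndexError on a J/S/Z/V instruction with n <= 0, since the robot list is empty; otherwise ZeroDivisionError at '% n' when n == 0); B returns [] there. — e.g. on roboti("J", 0): A raises IndexError, B returns []
import Mathlib
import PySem

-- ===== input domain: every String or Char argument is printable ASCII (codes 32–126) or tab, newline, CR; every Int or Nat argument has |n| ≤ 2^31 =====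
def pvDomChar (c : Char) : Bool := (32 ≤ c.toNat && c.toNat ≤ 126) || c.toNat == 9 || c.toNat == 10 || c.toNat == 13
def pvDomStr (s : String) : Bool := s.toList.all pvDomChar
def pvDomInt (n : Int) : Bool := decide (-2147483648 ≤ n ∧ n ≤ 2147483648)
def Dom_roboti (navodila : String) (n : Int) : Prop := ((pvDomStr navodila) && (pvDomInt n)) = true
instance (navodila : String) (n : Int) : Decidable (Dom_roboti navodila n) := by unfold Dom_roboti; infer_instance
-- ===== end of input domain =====

-- B replaces A's single interleaved round-robin pass by a per-robot decomposition (sum a delta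
-- table over positions i, i+n, i+2n, …); same cost, different traversal (objective: alternative).

-- ===== PORT A =====
-- one iteration of A's `for znak in navodila` loop over the state (trenutni_robot, seznam_robotov)
def robotiStep (n : Int) (st : Int × List (Int × Int)) (znak : Char) : Int × List (Int × Int) :=
  let s1 := if znak = 'J' then
      PySem.List.pySetD st.2 st.1 ((PySem.List.pyGetD st.2 st.1 (0, 0)).1, (PySem.List.pyGetD st.2 st.1 (0, 0)).2 - 1)
    else st.2
  let s2 := if znak = 'S' then
      PySem.List.pySetD s1 st.1 ((PySem.List.pyGetD s1 st.1 (0, 0)).1, (PySem.List.pyGetD s1 st.1 (0, 0)).2 + 1)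
    else s1
  let s3 := if znak = 'Z' then
      PySem.List.pySetD s2 st.1 ((PySem.List.pyGetD s2 st.1 (0, 0)).1 - 1, (PySem.List.pyGetD s2 st.1 (0, 0)).2)
    else s2
  let s4 := if znak = 'V' then
      PySem.List.pySetD s3 st.1 ((PySem.List.pyGetD s3 st.1 (0, 0)).1 + 1, (PySem.List.pyGetD s3 st.1 (0, 0)).2)
    else s3
  (PySem.Int.mod (st.1 + 1) n, s4)

def roboti (navodila : String) (n : Int) : List (Int × Int) :=
  let seznam_robotov := (PySem.List.pyRange 0 n 1).map (fun _ => ((0 : Int), (0 : Int)))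
  (navodila.toList.foldl (robotiStep n) (0, seznam_robotov)).2

-- ===== PORT B =====
-- the dict literal `delta` of Source B
def deltaDict : PySem.Dict Char (Int × Int) :=
  PySem.Dict.mk [('J', (0, -1)), ('S', (0, 1)), ('Z', (-1, 0)), ('V', (1, 0))]

def roboti_alt (navodila : String) (n : Int) : List (Int × Int) :=
  (PySem.List.pyRange 0 n 1).map (fun i =>
    (PySem.List.pyRange i (PySem.Str.len navodila) n).foldl
      (fun (acc : Int × Int) j =>
        let d := PySem.Dict.getD deltaDict (PySem.List.pyGetD navodila.toList j ' ') (0, 0)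
        (acc.1 + d.1, acc.2 + d.2))
      (0, 0))

-- ===== PRECONDITION & SPEC =====
-- Pre_ excludes exactly the inputs where A raises: with navodila non-empty and n <= 0 the robot
-- list is empty, so a J/S/Z/V character hits IndexError, and with n = 0 the `% n` hits ZeroDivisionError.
def Pre_roboti (navodila : String) (n : Int) : Prop :=
  0 < n ∨ navodila = "" ∨
    (n < 0 ∧ ∀ c ∈ navodila.toList, ¬(c = 'J' ∨ c = 'S' ∨ c = 'Z' ∨ c = 'V'))
instance (navodila : String) (n : Int) : Decidable (Pre_roboti navodila n) := by
  unfold Pre_roboti; infer_instance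

def pvWitness_roboti : String × Int := ("JJSVZ x", 3)

-- On non-empty navodila A raises (IndexError on a J/S/Z/V instruction with n <= 0, since the robot
-- list is empty; otherwise ZeroDivisionError at `% n` when n = 0); B returns [] there.
def Raises_roboti (navodila : String) (n : Int) : Prop :=
  navodila ≠ "" ∧
    (n = 0 ∨ (n < 0 ∧ ∃ c ∈ navodila.toList, (c = 'J' ∨ c = 'S' ∨ c = 'Z' ∨ c = 'V')))
instance (navodila : String) (n : Int) : Decidable (Raises_roboti navodila n) := by
  unfold Raises_roboti; infer_instance

def pvRaiseWitness_roboti : String × Int := ("J", 0)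
def pvRaiseWitnessOut_roboti : List (Int × Int) := []

def Spec_roboti (navodila : String) (n : Int) (out : List (Int × Int)) : Prop := out = roboti_alt navodila n
instance (navodila : String) (n : Int) (out : List (Int × Int)) : Decidable (Spec_roboti navodila n out) := by unfold Spec_roboti; infer_instance

-- ===== CLAIM (what is proved, stated in full; the proofs are below) =====
def Claim_equal_roboti : Prop := ∀ (navodila : String) (n : Int), Dom_roboti navodila n → Pre_roboti navodila n → Spec_roboti navodila n (roboti navodila n)

def Claim_raises_roboti : Prop := (∀ (navodila : String) (n : Int), Dom_roboti navodila n → Raises_roboti navodila n → ¬ Pre_roboti navodila n) ∧ (Dom_roboti (pvRaiseWitness_roboti.1) (pvRaiseWitness_roboti.2) ∧ Raises_roboti (pvRaiseWitness_roboti.1) (pvRaiseWitness_roboti.2) ∧ roboti_alt (pvRaiseWitness_roboti.1) (pvRaiseWitness_roboti.2) = pvRaiseWitnessOut_roboti)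

-- ===== LEMMAS AND PROOFS =====

-- B's per-character delta, as the proofs speak about it
def pvDelta (c : Char) : Int × Int := PySem.Dict.getD deltaDict c (0, 0)

-- A's fold preserves the length of the robot list
theorem robotiStep_length (n : Int) (st : Int × List (Int × Int)) (c : Char) :
    ((robotiStep n st c).2).length = st.2.length := by
  unfold robotiStep
  split_ifs <;> simp [PySem.List.length_pySetD]

theorem foldA_length (n : Int) (L : List Char) (tr : Int) (s : List (Int × Int)) :
    ((L.foldl (robotiStep n) (tr, s)).2).length = s.length := by
  induction L generalizing tr s with
  | nil => rfl
  | cons c L ih =>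
      simp only [List.foldl_cons]
      rw [show (robotiStep n (tr, s) c) = ((robotiStep n (tr, s) c).1, (robotiStep n (tr, s) c).2) from rfl]
      rw [ih, robotiStep_length]

-- A's round-robin counter after the whole fold
theorem foldA_fst (n : Int) (hn : 0 < n) (L : List Char) :
    ∀ (tr : Int) (s : List (Int × Int)), 0 ≤ tr → tr < n →
    (L.foldl (robotiStep n) (tr, s)).1 = PySem.Int.mod (tr + L.length) n := by
  induction L with
  | nil =>
      intro tr s htr0 htrn
      simp only [List.foldl_nil, List.length_nil, Int.natCast_zero, add_zero]
      rw [PySem.Int.mod_eq_emod_of_pos hn, Int.emod_eq_of_lt htr0 htrn]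
  | cons c L ih =>
      intro tr s htr0 htrn
      have h1 : (robotiStep n (tr, s) c).1 = PySem.Int.mod (tr + 1) n := rfl
      have h2 : 0 ≤ (robotiStep n (tr, s) c).1 := by
        rw [h1, PySem.Int.mod_eq_emod_of_pos hn]; exact Int.emod_nonneg _ (by omega)
      have h3 : (robotiStep n (tr, s) c).1 < n := by
        rw [h1, PySem.Int.mod_eq_emod_of_pos hn]; exact Int.emod_lt_of_pos _ hn
      simp only [List.foldl_cons]
      rw [show (robotiStep n (tr, s) c) = ((robotiStep n (tr, s) c).1, (robotiStep n (tr, s) c).2) from rfl]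
      rw [ih _ _ h2 h3, h1]
      simp only [PySem.Int.mod_eq_emod_of_pos hn, Int.emod_add_emod]
      congr 1
      push_cast [List.length_cons]
      ring

-- one step of A, characterized as a point update by the delta table
theorem robotiStep_snd (n : Int) (c : Char) (tr : Int) (s : List (Int × Int))
    (h0 : 0 ≤ tr) (h1 : tr < s.length) :
    (robotiStep n (tr, s) c).2 =
      s.set tr.toNat ((s.getD tr.toNat (0, 0)).1 + (pvDelta c).1, (s.getD tr.toNat (0, 0)).2 + (pvDelta c).2) := by
  have hg : PySem.List.pyGetD s tr (0,0) = s.getD tr.toNat (0,0) := by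
    rw [PySem.List.pyGetD_eq_getElem s (0,0) h0 h1, List.getD_eq_getElem _ _ (by omega)]
  have hset : s.set tr.toNat (s.getD tr.toNat (0,0)) = s := by
    rw [List.getD_eq_getElem _ _ (by omega)]; exact List.set_getElem_self (by omega)
  by_cases hJ : c = 'J'
  · subst hJ
    show (robotiStep n (tr, s) 'J').2 = _
    simp [robotiStep, Char.reduceEq, sub_eq_add_neg, PySem.List.pySetD_of_nonneg _ _ h0, hg,
      show pvDelta 'J' = (0, -1) from rfl]
  · by_cases hS : c = 'S'
    · subst hS
      simp [robotiStep, Char.reduceEq, PySem.List.pySetD_of_nonneg _ _ h0, hg,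
        show pvDelta 'S' = (0, 1) from rfl]
    · by_cases hZ : c = 'Z'
      · subst hZ
        simp [robotiStep, Char.reduceEq, sub_eq_add_neg, PySem.List.pySetD_of_nonneg _ _ h0, hg,
          show pvDelta 'Z' = (-1, 0) from rfl]
      · by_cases hV : c = 'V'
        · subst hV
          simp [robotiStep, Char.reduceEq, PySem.List.pySetD_of_nonneg _ _ h0, hg,
            show pvDelta 'V' = (1, 0) from rfl]
        · have e1 : ('J' == c) = false := beq_eq_false_iff_ne.mpr (fun h => hJ h.symm)
          have e2 : ('S' == c) = false := beq_eq_false_iff_ne.mpr (fun h => hS h.symm)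
          have e3 : ('Z' == c) = false := beq_eq_false_iff_ne.mpr (fun h => hZ h.symm)
          have e4 : ('V' == c) = false := beq_eq_false_iff_ne.mpr (fun h => hV h.symm)
          have hd : pvDelta c = (0, 0) := by
            simp only [pvDelta, deltaDict, PySem.Dict.getD, PySem.Dict.get?]
            rw [List.find?_cons_of_neg (by simpa using e1), List.find?_cons_of_neg (by simpa using e2),
                List.find?_cons_of_neg (by simpa using e3), List.find?_cons_of_neg (by simpa using e4)]
            rfl
          simp only [robotiStep, if_neg hJ, if_neg hS, if_neg hZ, if_neg hV, hd]
          show s = _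
          simpa using hset.symm

-- appending one element to a positive-step range
theorem pyRange_snoc (a b n : Int) (hn : 0 < n) (_ha : 0 ≤ a) :
    PySem.List.pyRange a (b + 1) n =
      PySem.List.pyRange a b n ++ (if a ≤ b ∧ PySem.Int.mod (b - a) n = 0 then [b] else []) := by
  by_cases hab : a ≤ b
  · have hd0 : 0 ≤ b - a := by omega
    set d := b - a with hd
    obtain ⟨q, r, hq0, hr0, hrn, hdqr⟩ :
        ∃ q r, 0 ≤ q ∧ 0 ≤ r ∧ r < n ∧ d = n * q + r := by
      refine ⟨d / n, d % n, Int.ediv_nonneg hd0 (by omega), Int.emod_nonneg _ (by omega),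
        Int.emod_lt_of_pos _ hn, ?_⟩
      have h := Int.mul_ediv_add_emod d n
      omega
    have hnq0 : 0 ≤ n * q := mul_nonneg (by omega) hq0
    rw [PySem.List.pyRange_of_pos _ _ hn, PySem.List.pyRange_of_pos _ _ hn]
    have hediv : ∀ x m : Int, 0 ≤ x → x < n → (x + n * m) / n = m := by
      intro x m hx0 hxn
      rw [mul_comm, Int.add_mul_ediv_right _ _ (by omega : n ≠ 0),
        Int.ediv_eq_zero_of_lt hx0 hxn, zero_add]
    have hcount1 : (b + 1 - a + n - 1) / n = q + 1 := by
      have hq : n * (q + 1) = n * q + n := by ring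
      have h1 : b + 1 - a + n - 1 = r + n * (q + 1) := by omega
      rw [h1, hediv r (q+1) hr0 hrn]
    by_cases hr : r = 0
    · -- new element b is appended
      have hmod : PySem.Int.mod (b - a) n = 0 := by
        rw [PySem.Int.mod_eq_emod_of_pos hn, ← hd, hdqr, hr, add_zero, mul_comm,
          Int.mul_emod_left]
      have hcond : a ≤ b ∧ PySem.Int.mod (b - a) n = 0 := ⟨hab, hmod⟩
      rw [if_pos (by omega : a < b + 1), if_pos hcond, hcount1]
      by_cases hd0' : a < b
      · have hq1 : 1 ≤ q := by
          rcases lt_or_ge q 1 with h | h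
          · have : n * q ≤ 0 := mul_nonpos_of_nonneg_of_nonpos (by omega) (by omega)
            omega
          · exact h
        have hcount0 : (b - a + n - 1) / n = q := by
          have h1 : b - a + n - 1 = (n - 1) + n * q := by omega
          rw [h1, hediv (n-1) q (by omega) (by omega)]
        rw [if_pos hd0', hcount0]
        have htn : (q + 1).toNat = q.toNat + 1 := by omega
        rw [htn, List.range_succ, List.map_append]
        congr 1
        simp only [List.map_singleton]
        congr 1
        have hqq : (q.toNat : Int) = q := by omega
        rw [hqq]
        omega
      · -- a = b, so d = 0, q = 0
        have hnq : n * q = 0 := by omega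
        have hqz : q = 0 := by
          rcases mul_eq_zero.mp hnq with h | h
          · omega
          · exact h
        rw [if_neg (by omega)]
        have hab' : b = a := by omega
        simp [hqz, List.range_succ, hab']
    · -- no new element
      have hmod : ¬ PySem.Int.mod (b - a) n = 0 := by
        rw [PySem.Int.mod_eq_emod_of_pos hn, ← hd, hdqr]
        have h1 : n * q + r = r + q * n := by ring
        rw [h1, Int.add_mul_emod_self_right, Int.emod_eq_of_lt hr0 hrn]
        exact hr
      have hcond : ¬ (a ≤ b ∧ PySem.Int.mod (b - a) n = 0) := by tauto
      have hab' : a < b := by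
        rcases lt_or_ge a b with h | h
        · exact h
        · omega
      rw [if_pos (by omega : a < b + 1), if_neg hcond, if_pos hab']
      have hcount0 : (b - a + n - 1) / n = q + 1 := by
        have hq : n * (q + 1) = n * q + n := by ring
        have h1 : b - a + n - 1 = (r - 1) + n * (q + 1) := by omega
        rw [h1, hediv (r-1) (q+1) (by omega) (by omega)]
      rw [hcount0, hcount1]
      simp
  · -- a > b : both ranges empty
    rw [if_neg (by tauto)]
    have e1 : PySem.List.pyRange a (b+1) n = [] := by
      rw [PySem.List.pyRange_of_pos _ _ hn, if_neg (by omega)]; rfl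
    have e2 : PySem.List.pyRange a b n = [] := by
      rw [PySem.List.pyRange_of_pos _ _ hn, if_neg (by omega)]; rfl
    simp [e1, e2]


-- B's inner accumulation for robot i over instruction list L
def pvEnt (n : Int) (L : List Char) (i : Int) : Int × Int :=
  (PySem.List.pyRange i (L.length : Int) n).foldl
    (fun (acc : Int × Int) j =>
      let d := PySem.Dict.getD deltaDict (PySem.List.pyGetD L j ' ') (0, 0)
      (acc.1 + d.1, acc.2 + d.2)) (0, 0)

theorem pyGetD_append_left (L : List Char) (c : Char) (j : Int) (d : Char)
    (h0 : 0 ≤ j) (h1 : j < L.length) :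
    PySem.List.pyGetD (L ++ [c]) j d = PySem.List.pyGetD L j d := by
  rw [PySem.List.pyGetD_eq_getElem _ _ h0 (by simp; omega),
    PySem.List.pyGetD_eq_getElem _ _ h0 h1,
    List.getElem_append_left (by omega)]

-- B's entry after appending one instruction

-- B's entry after appending one instruction
theorem pvEnt_snoc (n : Int) (hn : 0 < n) (L : List Char) (c : Char) (i : Int) (hi0 : 0 ≤ i) :
    pvEnt n (L ++ [c]) i =
      if i ≤ (L.length : Int) ∧ PySem.Int.mod ((L.length : Int) - i) n = 0 then
        ((pvEnt n L i).1 + (pvDelta c).1, (pvEnt n L i).2 + (pvDelta c).2)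
      else pvEnt n L i := by
  unfold pvEnt
  have hlen : ((L ++ [c]).length : Int) = (L.length : Int) + 1 := by simp
  rw [hlen, pyRange_snoc i (L.length : Int) n hn hi0, List.foldl_append]
  have hcongr : (PySem.List.pyRange i (L.length : Int) n).foldl
      (fun (acc : Int × Int) j =>
        let d := PySem.Dict.getD deltaDict (PySem.List.pyGetD (L ++ [c]) j ' ') (0, 0)
        (acc.1 + d.1, acc.2 + d.2)) (0, 0) =
      (PySem.List.pyRange i (L.length : Int) n).foldl
      (fun (acc : Int × Int) j =>
        let d := PySem.Dict.getD deltaDict (PySem.List.pyGetD L j ' ') (0, 0)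
        (acc.1 + d.1, acc.2 + d.2)) (0, 0) := by
    apply PySem.List.foldl_congr_mem
    intro acc x hx
    rcases (PySem.List.mem_pyRange_iff_of_pos hn x).mp hx with ⟨hx1, hx2, -⟩
    simp only [pyGetD_append_left L c x ' ' (by omega) hx2]
  rw [hcongr]
  split_ifs with h
  · simp only [List.foldl_cons, List.foldl_nil]
    have : PySem.List.pyGetD (L ++ [c]) (L.length : Int) ' ' = c := by
      rw [PySem.List.pyGetD_eq_getElem _ _ (by omega) (by simp)]
      simp
    rw [this]
    rfl
  · simp

theorem main_pos (n : Int) (hn : 0 < n) (L : List Char) :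
    (L.foldl (robotiStep n) (0, (PySem.List.pyRange 0 n 1).map (fun _ => ((0 : Int), (0 : Int))))).2 =
      (PySem.List.pyRange 0 n 1).map (fun i => pvEnt n L i) := by
  induction L using List.reverseRecOn with
  | nil =>
      simp only [List.foldl_nil]
      apply List.map_congr_left
      intro i hi
      rcases (PySem.List.mem_pyRange_one).mp (by simpa using hi) with ⟨hi0, hin⟩
      unfold pvEnt
      rw [show ((List.length ([] : List Char) : Int)) = 0 by simp]
      rw [PySem.List.pyRange_of_pos _ _ hn, if_neg (by omega)]
      rfl
  | append_singleton L c ih =>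
      rw [List.foldl_append, List.foldl_cons, List.foldl_nil]
      set P := L.foldl (robotiStep n) (0, (PySem.List.pyRange 0 n 1).map (fun _ => ((0 : Int), (0 : Int)))) with hP
      have hlenP : P.2.length = n.toNat := by
        rw [hP, foldA_length]; simp [PySem.List.length_pyRange_one]
      have ht : P.1 = PySem.Int.mod (0 + (L.length : Int)) n := by
        rw [hP]; exact foldA_fst n hn L 0 _ le_rfl hn
      have ht' : P.1 = ((L.length : Int)) % n := by
        rw [ht, PySem.Int.mod_eq_emod_of_pos hn]; ring_nf
      have ht0 : 0 ≤ P.1 := by rw [ht']; exact Int.emod_nonneg _ (by omega)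
      have htn : P.1 < n := by rw [ht']; exact Int.emod_lt_of_pos _ hn
      rw [show (robotiStep n P c) = (robotiStep n (P.1, P.2) c) by rw [hP]]
      rw [robotiStep_snd n c P.1 P.2 ht0 (by rw [hlenP]; omega)]
      apply List.ext_getElem
      · simp [hlenP, PySem.List.length_pyRange_one]
      · intro k hk1 hk2
        have hkn : k < n.toNat := by simpa [hlenP] using hk1
        have hget : ∀ j (hj : j < n.toNat),
            ((PySem.List.pyRange 0 n 1).map (fun i => pvEnt n L i))[j]'(by simp [PySem.List.length_pyRange_one]; omega) = pvEnt n L (j : Int) := by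
          intro j hj
          rw [List.getElem_map, PySem.List.getElem_pyRange_one _ _ _ (by simp [PySem.List.length_pyRange_one]; omega), zero_add]
        rw [List.getElem_set, List.getElem_map,
          PySem.List.getElem_pyRange_one _ _ _ (by simpa using hk2), zero_add]
        rw [pvEnt_snoc n hn L c (k : Int) (by omega)]
        have hcond : ((k : Int) ≤ (L.length : Int) ∧ PySem.Int.mod ((L.length : Int) - (k : Int)) n = 0)
            ↔ P.1.toNat = k := by
          constructor
          · rintro ⟨hkL, hmod⟩
            rw [PySem.Int.mod_eq_emod_of_pos hn] at hmod
            have h1 : ((L.length : Int) - k) % n = 0 := hmod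
            have h2 : (L.length : Int) % n = (k : Int) % n := by
              rw [Int.emod_eq_emod_iff_emod_sub_eq_zero]; exact h1
            have h3 : (k : Int) % n = k := Int.emod_eq_of_lt (by omega) (by omega)
            omega
          · intro hpk
            have hself : P.1 = (k : Int) := by omega
            have h3 : (k : Int) % n = k := Int.emod_eq_of_lt (by omega) (by omega)
            have h4 : (L.length : Int) % n = (k : Int) % n := by omega
            have h2 : ((L.length : Int) - k) % n = 0 :=
              Int.emod_eq_emod_iff_emod_sub_eq_zero.mp h4
            constructor
            · -- k ≤ L.length
              have := Int.emod_lt_of_pos (L.length : Int) hn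
              have h4 : ((L.length : Int)) % n ≤ (L.length : Int) := by
                rcases lt_or_ge (L.length : Int) n with h | h
                · rw [Int.emod_eq_of_lt (by omega) h]
                · omega
              omega
            · rw [PySem.Int.mod_eq_emod_of_pos hn]; exact h2
        have hPk2 : ∀ (hh : k < P.2.length), P.2[k] = pvEnt n L (k : Int) := by
          intro hh
          rw [List.getElem_of_eq ih]
          exact hget k hkn
        by_cases hc : P.1.toNat = k
        · rw [if_pos (hcond.mpr hc), if_pos hc]
          have hPk : P.2.getD P.1.toNat (0, 0) = pvEnt n L (k : Int) := by
            rw [hc, List.getD_eq_getElem _ _ (by omega)]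
            exact hPk2 _
          rw [hPk]
        · rw [if_neg (fun h => hc (hcond.mp h)), if_neg hc]
          exact hPk2 _

-- untouched state when no instruction character occurs (the n < 0 leg of Pre_)
theorem foldA_noop (n : Int) (L : List Char)
    (h : ∀ c ∈ L, ¬(c = 'J' ∨ c = 'S' ∨ c = 'Z' ∨ c = 'V')) (tr : Int) (s : List (Int × Int)) :
    (L.foldl (robotiStep n) (tr, s)).2 = s := by
  induction L generalizing tr s with
  | nil => rfl
  | cons c L ih =>
      have hc := h c (by simp)
      simp only [List.foldl_cons]
      rw [show (robotiStep n (tr, s) c) = ((robotiStep n (tr, s) c).1, (robotiStep n (tr, s) c).2) from rfl, ih (fun x hx => h x (List.mem_cons_of_mem _ hx)) _ _]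
      unfold robotiStep
      simp only [not_or] at hc
      simp [hc.1, hc.2.1, hc.2.2.1, hc.2.2.2]

-- ===== VERDICT (by name: the statement is the Claim_ definition above) =====
theorem roboti_spec : Claim_equal_roboti := by
  intro navodila n _ hpre
  unfold Spec_roboti
  by_cases hn : 0 < n
  · have hB : roboti_alt navodila n = (PySem.List.pyRange 0 n 1).map (fun i => pvEnt n navodila.toList i) := by
      unfold roboti_alt pvEnt
      rw [PySem.Str.len_eq]
    rw [hB]
    exact main_pos n hn navodila.toList
  · have hrange : PySem.List.pyRange 0 n 1 = [] := PySem.List.pyRange_one_eq_nil (by omega)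
    have hB : roboti_alt navodila n = [] := by unfold roboti_alt; rw [hrange]; rfl
    rcases hpre with h | h | ⟨-, hall⟩
    · omega
    · subst h
      rw [hB]
      show (([] : List Char).foldl (robotiStep n) (0, (PySem.List.pyRange 0 n 1).map (fun _ => ((0 : Int), (0 : Int))))).2 = []
      rw [hrange]
      rfl
    · rw [hB]
      show (navodila.toList.foldl (robotiStep n) (0, (PySem.List.pyRange 0 n 1).map (fun _ => ((0 : Int), (0 : Int))))).2 = []
      rw [foldA_noop n navodila.toList hall, hrange]
      rfl

@[simp] theorem roboti_raises : Claim_raises_roboti := by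
  unfold Claim_raises_roboti
  constructor
  · intro navodila n _ hr
    unfold Raises_roboti at hr
    unfold Pre_roboti
    push Not
    rcases hr with ⟨hne, h0 | ⟨hneg, c, hc, hcv⟩⟩
    · exact ⟨by omega, hne, fun h => absurd h0 (by omega)⟩
    · exact ⟨by omega, hne, fun _ => ⟨c, hc, hcv⟩⟩
  · exact ⟨by decide, by decide, by decide⟩
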